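-- pv_equiv track=rewrite | github.com/nobe0716/problem_solving | codeforces/contests/1295/C. Obtain The String.py | solve
-- ===== SOURCE A (Python) =====
-- import bisect
-- from collections import defaultdict
--
-- def solve(s, t):
--     if set(t) - set(s):
--         return -1
--
--     pos = defaultdict(list)
--     for i in range(len(s)):
--         pos[s[i]].append(i)
--
--     c = 1
--     j = pos[t[0]][0]
--     for e in t[1:]:
--         k = bisect.bisect(pos[e], j)
--         if k < len(pos[e]):
--             j = pos[e][k]
--         else:
--             c += 1
--             j = pos[e][0]
--     return c
-- ===== SOURCE B (Python) =====
-- def solve(s, t):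
--     c = 1
--     j = s.find(t[0])
--     if j < 0:
--         return -1
--     for e in t[1:]:
--         k = s.find(e, j + 1)
--         if k < 0:
--             c += 1
--             k = s.find(e)
--             if k < 0:
--                 return -1
--         j = k
--     return c
-- ===== Notes on version B (the rewrite author's own statement) =====
-- stated objective: faster
-- what changed: Replaces A's per-character positions index (defaultdict of index lists + bisect per t-character) with a direct greedy scan of s using C-level str.find with a start offset, wrapping (and counting a new pass) when no later occurrence exists; the missing-character check becomes find returning -1 instead of an upfront set difference.
import Mathlib
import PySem

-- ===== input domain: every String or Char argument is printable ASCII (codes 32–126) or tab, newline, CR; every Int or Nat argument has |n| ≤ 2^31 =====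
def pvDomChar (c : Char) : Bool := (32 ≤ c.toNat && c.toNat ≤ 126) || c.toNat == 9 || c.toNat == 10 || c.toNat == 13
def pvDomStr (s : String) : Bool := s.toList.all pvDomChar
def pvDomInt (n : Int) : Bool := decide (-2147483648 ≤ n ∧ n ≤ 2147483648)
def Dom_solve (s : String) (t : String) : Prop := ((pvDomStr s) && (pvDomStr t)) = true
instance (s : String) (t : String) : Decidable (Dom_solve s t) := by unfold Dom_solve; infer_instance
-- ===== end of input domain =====

-- B replaces A's positions-index (defaultdict of index lists + bisect) with a direct greedy
-- scan of s via str.find with a start offset (objective: faster, measured constant-factor).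

-- ===== PORT A =====
-- pos = defaultdict(list); for i in range(len(s)): pos[s[i]].append(i)
-- bisect.bisect is the stdlib call, ported as PySem.List.bisectRight.
def solve (s : String) (t : String) : Int :=
  let sl := s.toList
  let tl := t.toList
  -- if set(t) - set(s): return -1
  if PySem.Set.diff (PySem.Set.ofList tl) (PySem.Set.ofList sl) ≠ [] then -1
  else
    let pos : PySem.Dict Char (List Int) :=
      (PySem.List.enumerate sl 0).foldl (fun d p => d.modify p.2 [] (· ++ [p.1])) PySem.Dict.empty
    match tl with
    | [] => 0  -- Python raises IndexError here (pos[t[0]][0] on empty list); Pre_solve excludes t = ""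
    | t0 :: rest =>
      -- j = pos[t[0]][0]; after the set check t0 ∈ s, so index 0 is in range (.getD 0 unreachable)
      let j0 : Int := (PySem.List.pyGet? (pos.getD t0 []) 0).getD 0
      let r := rest.foldl (fun (st : Int × Int) e =>
        let l := pos.getD e []
        let k := PySem.List.bisectRight l st.2
        if k < l.length then (st.1, (PySem.List.pyGet? l (k : Int)).getD 0)
        else (st.1 + 1, (PySem.List.pyGet? l 0).getD 0)) (1, j0)
      r.1

-- ===== PORT B =====
-- the for-loop of Source B with its early 'return -1'
def solveAltLoop (sl : List Char) (rest : List Char) (c : Int) (j : Int) : Int :=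
  match rest with
  | [] => c
  | e :: rs =>
    let k := PySem.Chars.findFrom sl [e] (j + 1)   -- s.find(e, j + 1)
    if k < 0 then
      let k0 := PySem.Chars.find sl [e]            -- s.find(e)
      if k0 < 0 then -1
      else solveAltLoop sl rs (c + 1) k0
    else solveAltLoop sl rs c k

def solve_alt (s : String) (t : String) : Int :=
  let sl := s.toList
  match t.toList with
  | [] => 0  -- Source B raises IndexError here (t[0]); Pre_solve excludes t = ""
  | t0 :: rest =>
    let j := PySem.Chars.find sl [t0]              -- s.find(t[0])
    if j < 0 then -1
    else solveAltLoop sl rest 1 j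

-- ===== PRECONDITION & SPEC =====
-- Both A and Source B raise IndexError when t is empty (t[0] / pos[t[0]][0]); Pre_ excludes only t = "".
def Pre_solve (s : String) (t : String) : Prop := t ≠ ""
instance (s : String) (t : String) : Decidable (Pre_solve s t) := by unfold Pre_solve; infer_instance
def pvWitness_solve : String × String := ("ab", "ba")

def Spec_solve (s : String) (t : String) (out : Int) : Prop := out = solve_alt s t
instance (s : String) (t : String) (out : Int) : Decidable (Spec_solve s t out) := by unfold Spec_solve; infer_instance

-- ===== CLAIM (what is proved, stated in full; the proofs are below) =====
def Claim_equal_solve : Prop := ∀ (s : String) (t : String), Dom_solve s t → Pre_solve s t → Spec_solve s t (solve s t)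

-- ===== LEMMAS AND PROOFS =====

-- the list of indices at which character e occurs in sl, in increasing order
def occ (sl : List Char) (e : Char) : List Int :=
  ((PySem.List.enumerate sl 0).filter (fun p => p.2 == e)).map (fun p => p.1)

-- A's loop body, with pos.getD e [] replaced by its value occ sl e
def stepA (sl : List Char) (st : Int × Int) (e : Char) : Int × Int :=
  let l := occ sl e
  let k := PySem.List.bisectRight l st.2
  if k < l.length then (st.1, (PySem.List.pyGet? l (k : Int)).getD 0)
  else (st.1 + 1, (PySem.List.pyGet? l 0).getD 0)

lemma fold_modify_getD (l : List (Int × Char)) (d : PySem.Dict Char (List Int)) (e : Char) :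
    (l.foldl (fun d p => d.modify p.2 [] (· ++ [p.1])) d).getD e []
      = d.getD e [] ++ (l.filter (fun p => p.2 == e)).map (fun p => p.1) := by
  induction l generalizing d with
  | nil => simp
  | cons p l ih =>
    simp only [List.foldl_cons, ih, List.filter_cons]
    rw [PySem.Dict.getD_modify]
    by_cases h : e = p.2
    · simp [h, List.append_assoc]
    · have h2 : ¬ (p.2 == e) = true := by simp [beq_iff_eq]; exact fun hh => h hh.symm
      simp [h, h2]

lemma occ_eq_pos (sl : List Char) (e : Char) :
    ((PySem.List.enumerate sl 0).foldl (fun d p => d.modify p.2 [] (· ++ [p.1]))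
        PySem.Dict.empty).getD e [] = occ sl e := by
  simpa [occ] using fold_modify_getD (PySem.List.enumerate sl 0) PySem.Dict.empty e

lemma occ_sorted (sl : List Char) (e : Char) : (occ sl e).Pairwise (· < ·) :=
  ((PySem.List.pairwise_lt_enumerate sl 0).filter _).map _ (fun _ _ h => h)

lemma mem_occ (sl : List Char) (e : Char) (x : Int) :
    x ∈ occ sl e ↔ ∃ (k : Nat) (h : k < sl.length), x = (k : Int) ∧ sl[k] = e := by
  simp only [occ, List.mem_map, List.mem_filter, PySem.List.mem_enumerate_iff]
  constructor
  · rintro ⟨p, ⟨⟨k, hk, rfl⟩, hbeq⟩, rfl⟩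
    exact ⟨k, hk, by simp, by simpa using hbeq⟩
  · rintro ⟨k, hk, rfl, he⟩
    exact ⟨((k : Int), e), ⟨⟨k, hk, by simp [he]⟩, by simp⟩, rfl⟩

lemma occ_bounds {sl : List Char} {e : Char} {x : Int} (hx : x ∈ occ sl e) :
    0 ≤ x ∧ x < (sl.length : Int) := by
  obtain ⟨k, hk, rfl, _⟩ := (mem_occ sl e x).mp hx
  constructor <;> [exact Int.natCast_nonneg k; exact_mod_cast hk]

lemma occ_ne_nil {sl : List Char} {e : Char} (h : e ∈ sl) : occ sl e ≠ [] := by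
  obtain ⟨k, hk, hke⟩ := List.mem_iff_getElem.mp h
  have : (k : Int) ∈ occ sl e := (mem_occ sl e k).mpr ⟨k, hk, rfl, hke⟩
  exact List.ne_nil_of_mem this

lemma occ_nil_of_not_mem {sl : List Char} {e : Char} (h : e ∉ sl) : occ sl e = [] := by
  rw [List.eq_nil_iff_forall_not_mem]
  intro x hx
  obtain ⟨k, hk, _, hke⟩ := (mem_occ sl e x).mp hx
  exact h (hke ▸ List.getElem_mem hk)

-- find? for 'j < ·' on a strictly increasing list returns the least element above j
lemma find?_lt_sorted (l : List Int) (j : Int) (hs : l.Pairwise (· < ·)) (x : Int) :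
    l.find? (fun y => decide (j < y)) = some x ↔ x ∈ l ∧ j < x ∧ ∀ y ∈ l, j < y → x ≤ y := by
  induction l with
  | nil => simp
  | cons a tl ih =>
    have ha : ∀ y ∈ tl, a < y := (List.pairwise_cons.mp hs).1
    have hs' : tl.Pairwise (· < ·) := (List.pairwise_cons.mp hs).2
    by_cases hja : j < a
    · rw [List.find?_cons_of_pos (by simpa using hja)]
      constructor
      · rintro h
        have hax : a = x := by simpa using h
        subst hax
        refine ⟨List.mem_cons_self, hja, ?_⟩
        intro y hy
        rcases List.mem_cons.mp hy with rfl | hy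
        · exact fun _ => le_rfl
        · exact fun _ => le_of_lt (ha y hy)
      · rintro ⟨hmem, hjx, hmin⟩
        have hxa : x ≤ a := hmin a (List.mem_cons_self) hja
        rcases List.mem_cons.mp hmem with h | hx
        · rw [h]
        · exact absurd hxa (not_le.mpr (ha x hx))
    · rw [List.find?_cons_of_neg (by simpa using hja)]
      rw [ih hs']
      constructor
      · rintro ⟨hm, hjx, hmin⟩
        refine ⟨List.mem_cons_of_mem _ hm, hjx, ?_⟩
        intro y hy
        rcases List.mem_cons.mp hy with rfl | hy
        · exact fun h => absurd h hja
        · exact hmin y hy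
      · rintro ⟨hm, hjx, hmin⟩
        have hx : x ∈ tl := by
          rcases List.mem_cons.mp hm with rfl | hx
          · exact absurd hjx hja
          · exact hx
        exact ⟨hx, hjx, fun y hy hjy => hmin y (List.mem_cons_of_mem _ hy) hjy⟩

-- A's bisect step: the element at the insertion point is that least element (none iff it does not exist)
lemma bisect_find (l : List Int) (j : Int) (hs : l.Pairwise (· < ·)) :
    l[PySem.List.bisectRight l j]? = l.find? (fun y => decide (j < y)) := by
  obtain ⟨hle, hlo, hhi⟩ := PySem.List.bisectRight_spec l j (hs.imp le_of_lt)
  by_cases hlt : PySem.List.bisectRight l j < l.length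
  · rw [List.getElem?_eq_getElem hlt]
    symm
    rw [find?_lt_sorted l j hs]
    refine ⟨List.getElem_mem hlt, hhi _ hlt le_rfl, ?_⟩
    intro y hy hjy
    obtain ⟨i, hi, rfl⟩ := List.mem_iff_getElem.mp hy
    by_cases hik : i < PySem.List.bisectRight l j
    · exact absurd hjy (not_lt.mpr (hlo i hi hik))
    · rcases Nat.lt_or_ge (PySem.List.bisectRight l j) i with h | h
      · exact le_of_lt ((List.pairwise_iff_getElem.mp hs) _ i hlt hi h)
      · have : i = PySem.List.bisectRight l j := le_antisymm h (not_lt.mp hik)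
        subst this
        exact le_rfl
  · rw [List.getElem?_eq_none (not_lt.mp hlt)]
    symm
    rw [List.find?_eq_none]
    intro x hx
    obtain ⟨i, hi, rfl⟩ := List.mem_iff_getElem.mp hx
    simpa using not_lt.mpr (hlo i hi (by omega))

lemma single_prefix (e : Char) (m : List Char) : [e] <+: m ↔ m.head? = some e := by
  cases m with
  | nil => simp
  | cons b bs => simp [List.cons_prefix_cons, eq_comm]

lemma single_infix (e : Char) (m : List Char) : [e] <:+: m ↔ e ∈ m := by
  constructor
  · intro h; exact h.subset (List.mem_singleton_self e)
  · intro h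
    obtain ⟨l1, l2, rfl⟩ := List.append_of_mem h
    exact ⟨l1, l2, by simp⟩

lemma find_single_not_mem (m : List Char) (e : Char) (h : e ∉ m) :
    PySem.Chars.find m [e] = -1 := by
  rw [PySem.Chars.find_eq_neg_one_iff, single_infix]
  exact h

lemma prefix_drop_iff (m : List Char) (e : Char) (n : Nat) :
    [e] <+: m.drop n ↔ m[n]? = some e := by
  rw [single_prefix, List.head?_eq_getElem?, List.getElem?_drop, Nat.add_zero]

lemma find_single_mem (m : List Char) (e : Char) (h : e ∈ m) :
    0 ≤ PySem.Chars.find m [e] ∧ m[(PySem.Chars.find m [e]).toNat]? = some e ∧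
      ∀ i : Nat, i < (PySem.Chars.find m [e]).toNat → m[i]? ≠ some e := by
  have h0 : 0 ≤ PySem.Chars.find m [e] :=
    (PySem.Chars.find_nonneg_iff m [e]).mpr ((single_infix e m).mpr h)
  obtain ⟨hpre, hmin⟩ := PySem.Chars.find_spec h0
  refine ⟨h0, (prefix_drop_iff m e _).mp hpre, ?_⟩
  intro i hi hcon
  exact hmin i hi ((prefix_drop_iff m e i).mpr hcon)

-- B's find-with-start step equals that same least element (−1 if it does not exist)
lemma findFrom_single (sl : List Char) (e : Char) (j : Int) (hj : -1 ≤ j)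
    (hlen : j + 1 ≤ (sl.length : Int)) :
    PySem.Chars.findFrom sl [e] (j + 1)
      = ((occ sl e).find? (fun y => decide (j < y))).getD (-1) := by
  have hj1 : 0 ≤ j + 1 := by omega
  have hcast : j + 1 = ((j + 1).toNat : Int) := (Int.toNat_of_nonneg hj1).symm
  have hkle : (j + 1).toNat ≤ sl.length := by omega
  rw [hcast, PySem.Chars.findFrom_natCast sl [e] _ hkle]
  by_cases hmem : e ∈ sl.drop (j + 1).toNat
  · obtain ⟨h0, hget, hminfd⟩ := find_single_mem (sl.drop (j + 1).toNat) e hmem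
    have hne : PySem.Chars.find (sl.drop (j + 1).toNat) [e] ≠ -1 := by omega
    rw [if_neg hne]
    rw [List.getElem?_drop] at hget
    have hlt : (j + 1).toNat + (PySem.Chars.find (sl.drop (j + 1).toNat) [e]).toNat < sl.length :=
      (List.getElem?_eq_some_iff.mp hget).1
    have hfind? : (occ sl e).find? (fun y => decide (j < y))
        = some (((j + 1).toNat + (PySem.Chars.find (sl.drop (j + 1).toNat) [e]).toNat : Nat) : Int) := by
      rw [find?_lt_sorted _ _ (occ_sorted sl e)]
      refine ⟨(mem_occ sl e _).mpr ⟨_, hlt, rfl, (List.getElem?_eq_some_iff.mp hget).2⟩, by omega, ?_⟩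
      intro y hy hjy
      obtain ⟨i, hi, rfl, hie⟩ := (mem_occ sl e y).mp hy
      have hki : (j + 1).toNat ≤ i := by omega
      have hdi : (sl.drop (j + 1).toNat)[i - (j + 1).toNat]? = some e := by
        rw [List.getElem?_drop]
        rw [Nat.add_sub_cancel' hki]
        exact List.getElem?_eq_some_iff.mpr ⟨hi, hie⟩
      have : ¬ (i - (j + 1).toNat < (PySem.Chars.find (sl.drop (j + 1).toNat) [e]).toNat) :=
        fun hc => hminfd _ hc hdi
      omega
    rw [hfind?]
    simp only [Option.getD_some]
    push_cast [Int.toNat_of_nonneg h0]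
    ring
  · rw [find_single_not_mem _ _ hmem, if_pos rfl]
    have : (occ sl e).find? (fun y => decide (j < y)) = none := by
      rw [List.find?_eq_none]
      intro x hx hcon
      obtain ⟨i, hi, rfl, hie⟩ := (mem_occ sl e x).mp hx
      have hji : j < (i : Int) := by simpa using hcon
      have hki : (j + 1).toNat ≤ i := by omega
      have : (sl.drop (j + 1).toNat)[i - (j + 1).toNat]? = some e := by
        rw [List.getElem?_drop, Nat.add_sub_cancel' hki]
        exact List.getElem?_eq_some_iff.mpr ⟨hi, hie⟩
      exact hmem (List.mem_of_getElem? this)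
    rw [this]
    rfl

lemma head?_find (l : List Int) (hpos : ∀ x ∈ l, 0 ≤ x) :
    l.find? (fun y => decide ((-1 : Int) < y)) = l.head? := by
  cases l with
  | nil => rfl
  | cons a tl =>
    rw [List.find?_cons_of_pos]
    · rfl
    · have : 0 ≤ a := hpos a (List.mem_cons_self)
      simpa using by omega

-- first occurrence: s.find(e) = head of occ (for e ∈ sl)
lemma find_eq_occ_head {sl : List Char} {e : Char} {x0 : Int} {os : List Int}
    (hocc : occ sl e = x0 :: os) : PySem.Chars.find sl [e] = x0 := by
  have h := findFrom_single sl e (-1) le_rfl (by positivity)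
  rw [show (-1 : Int) + 1 = 0 by ring, PySem.Chars.findFrom_zero] at h
  rw [h, head?_find _ (fun x hx => (occ_bounds hx).1), hocc]
  rfl

-- one step of A's loop and one step of B's loop do the same thing and preserve the invariant
lemma step_both (sl : List Char) (e : Char) (c j : Int) (he : e ∈ sl) (hj : 0 ≤ j)
    (hlt : j < (sl.length : Int)) :
    ∃ j', stepA sl (c, j) e = ((stepA sl (c, j) e).1, j') ∧ 0 ≤ j' ∧ j' < (sl.length : Int) ∧
      ∀ rs, solveAltLoop sl (e :: rs) c j = solveAltLoop sl rs (stepA sl (c, j) e).1 j' := by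
  have hB := bisect_find (occ sl e) j (occ_sorted sl e)
  have hF := findFrom_single sl e j (by omega) (by omega)
  cases hfind : (occ sl e).find? (fun y => decide (j < y)) with
  | some x =>
    have hxo : x ∈ occ sl e := List.mem_of_find?_eq_some hfind
    have hxb := occ_bounds hxo
    have hgetk : (occ sl e)[PySem.List.bisectRight (occ sl e) j]? = some x := hB.trans hfind
    have hklt : PySem.List.bisectRight (occ sl e) j < (occ sl e).length :=
      (List.getElem?_eq_some_iff.mp hgetk).1
    have hstep : stepA sl (c, j) e = (c, x) := by
      simp only [stepA, if_pos hklt, PySem.List.pyGet?_natCast, hgetk, Option.getD_some]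
    refine ⟨x, by rw [hstep], hxb.1, hxb.2, ?_⟩
    intro rs
    rw [hstep]
    simp only [solveAltLoop, hF, hfind, Option.getD_some]
    rw [if_neg (by omega)]
  | none =>
    cases hocc : occ sl e with
    | nil => exact absurd hocc (occ_ne_nil he)
    | cons x0 os =>
      have hx0 : x0 ∈ occ sl e := by rw [hocc]; exact List.mem_cons_self
      have hxb := occ_bounds hx0
      have hknl : ¬ PySem.List.bisectRight (occ sl e) j < (occ sl e).length := by
        intro hc
        rw [List.getElem?_eq_getElem hc, hfind] at hB
        simp at hB
      have hpy0 : PySem.List.pyGet? (occ sl e) 0 = some x0 := by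
        have h := PySem.List.pyGet?_natCast (occ sl e) 0
        rw [Nat.cast_zero] at h
        rw [h, hocc]
        rfl
      have hstep : stepA sl (c, j) e = (c + 1, x0) := by
        simp only [stepA, if_neg hknl, hpy0, Option.getD_some]
      refine ⟨x0, by rw [hstep], hxb.1, hxb.2, ?_⟩
      intro rs
      rw [hstep]
      simp only [solveAltLoop, hF, hfind]
      rw [if_pos (by norm_num), find_eq_occ_head hocc, if_neg (by omega)]

lemma loop_eq (sl : List Char) (rest : List Char) (c j : Int)
    (hmem : ∀ e ∈ rest, e ∈ sl) (hj : 0 ≤ j) (hlt : j < (sl.length : Int)) :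
    (rest.foldl (stepA sl) (c, j)).1 = solveAltLoop sl rest c j := by
  induction rest generalizing c j with
  | nil => simp [solveAltLoop]
  | cons e rs ih =>
    obtain ⟨j', hstep, hj', hlt', hB⟩ :=
      step_both sl e c j (hmem e (List.mem_cons_self)) hj hlt
    rw [List.foldl_cons, hB rs, hstep]
    exact ih _ _ (fun x hx => hmem x (List.mem_cons_of_mem _ hx)) hj' hlt'

lemma loop_missing (sl : List Char) (rest : List Char) (c j : Int)
    (hj : 0 ≤ j) (hlt : j < (sl.length : Int)) (hmiss : ∃ e ∈ rest, e ∉ sl) :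
    solveAltLoop sl rest c j = -1 := by
  induction rest generalizing c j with
  | nil => simp at hmiss
  | cons e rs ih =>
    by_cases he : e ∈ sl
    · obtain ⟨j', hstep, hj', hlt', hB⟩ := step_both sl e c j he hj hlt
      rw [hB rs]
      obtain ⟨w, hw, hwn⟩ := hmiss
      rcases List.mem_cons.mp hw with rfl | hw
      · exact absurd he hwn
      · exact ih _ _ hj' hlt' ⟨w, hw, hwn⟩
    · have hF := findFrom_single sl e j (by omega) (by omega)
      have hocc : occ sl e = [] := occ_nil_of_not_mem he
      rw [hocc] at hF
      simp only [List.find?_nil, Option.getD_none] at hF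
      simp only [solveAltLoop, hF]
      rw [if_pos (by norm_num), find_single_not_mem sl e he, if_pos (by norm_num)]

lemma solve_eq_alt (s t : String) (hpre : t.toList ≠ []) : solve s t = solve_alt s t := by
  obtain ⟨t0, rest, htl⟩ : ∃ t0 rest, t.toList = t0 :: rest := by
    cases h : t.toList with
    | nil => exact absurd h hpre
    | cons a l => exact ⟨a, l, rfl⟩
  by_cases hsub : ∀ e ∈ t.toList, e ∈ s.toList
  · have hdiff : PySem.Set.diff (PySem.Set.ofList t.toList) (PySem.Set.ofList s.toList) = [] := by
      rw [List.eq_nil_iff_forall_not_mem]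
      intro x hx
      obtain ⟨hxs, hxn⟩ := (PySem.Set.mem_diff _ _ x).mp hx
      exact hxn ((PySem.Set.mem_ofList _ x).mpr (hsub x ((PySem.Set.mem_ofList _ x).mp hxs)))
    have ht0 : t0 ∈ s.toList := hsub t0 (htl ▸ List.mem_cons_self)
    rw [htl] at hdiff
    cases hocc0 : occ s.toList t0 with
    | nil => exact absurd hocc0 (occ_ne_nil ht0)
    | cons x0 os =>
      have hx0 : x0 ∈ occ s.toList t0 := by rw [hocc0]; exact List.mem_cons_self
      have hxb := occ_bounds hx0
      have hj0 : (PySem.List.pyGet? (occ s.toList t0) 0).getD 0 = x0 := by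
        have h0 := PySem.List.pyGet?_natCast (occ s.toList t0) 0
        rw [Nat.cast_zero] at h0
        rw [h0, hocc0]
        rfl
      have hfind0 : PySem.Chars.find s.toList [t0] = x0 := find_eq_occ_head hocc0
      simp only [solve, solve_alt, htl]
      rw [if_neg (by simp [hdiff])]
      simp only [occ_eq_pos]
      rw [hj0, hfind0, if_neg (by omega)]
      exact loop_eq s.toList rest 1 x0
        (fun e he => hsub e (htl ▸ List.mem_cons_of_mem _ he)) hxb.1 hxb.2
  · obtain ⟨w, hw, hwn⟩ : ∃ w ∈ t.toList, w ∉ s.toList := by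
      by_contra hc
      exact hsub fun e he => by
        by_contra hne
        exact hc ⟨e, he, hne⟩
    have hdiff : PySem.Set.diff (PySem.Set.ofList t.toList) (PySem.Set.ofList s.toList) ≠ [] := by
      intro hnil
      have : w ∈ PySem.Set.diff (PySem.Set.ofList t.toList) (PySem.Set.ofList s.toList) :=
        (PySem.Set.mem_diff _ _ w).mpr
          ⟨(PySem.Set.mem_ofList _ w).mpr hw, fun hc => hwn ((PySem.Set.mem_ofList _ w).mp hc)⟩
      rw [hnil] at this
      exact List.not_mem_nil this
    rw [htl] at hdiff
    simp only [solve, solve_alt, htl]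
    rw [if_pos hdiff]
    by_cases ht0 : t0 ∈ s.toList
    · cases hocc0 : occ s.toList t0 with
      | nil => exact absurd hocc0 (occ_ne_nil ht0)
      | cons x0 os =>
        have hx0 : x0 ∈ occ s.toList t0 := by rw [hocc0]; exact List.mem_cons_self
        have hxb := occ_bounds hx0
        rw [find_eq_occ_head hocc0, if_neg (by omega)]
        have hwrest : w ∈ rest := by
          rw [htl] at hw
          rcases List.mem_cons.mp hw with rfl | hw
          · exact absurd ht0 hwn
          · exact hw
        exact (loop_missing s.toList rest 1 x0 hxb.1 hxb.2 ⟨w, hwrest, hwn⟩).symm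
    · rw [find_single_not_mem s.toList t0 ht0, if_pos (by norm_num)]

-- ===== VERDICT (by name: the statement is the Claim_ definition above) =====
theorem solve_spec : Claim_equal_solve := by
  intro s t _ hpre
  unfold Spec_solve
  apply solve_eq_alt
  intro hnil
  apply hpre
  have h2 : t.toList = "".toList := by simpa using hnil
  exact String.toList_inj.mp h2
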